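-- pv_equiv track=rewrite | github.com/tmu-nlp/UniTP | data/ner_types.py | substitute_o
-- ===== SOURCE A (Python) =====
-- def substitute_o(old_ner, old_fence, n_indices, o_idx):
--     substution = 0
--     new_ner, new_fence = [], [0]
--     for ner, start, end in zip(old_ner, old_fence, old_fence[1:]):
--         substituted = None
--         # import pdb; pdb.set_trace()
--         while substution < len(n_indices) and (lhs := n_indices[substution]) < end:
--             if new_fence[-1] < lhs:
--                 new_ner.append(ner)
--                 new_fence.append(lhs)
--             new_ner.append(o_idx)
--             if (rhs := lhs + 1) < end:
--                 new_fence.append(rhs)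
--             substution += 1
--             substituted = lhs
--         if substituted is None or substituted < end - 1:
--             new_ner.append(ner)
--         new_fence.append(end)
--     return new_ner, new_fence
-- ===== SOURCE B (Python) =====
-- def _render(ner, end, last, hits, o_idx):
--     # render one segment from its own hit list; no state shared with other segments
--     ners, fences = [], []
--     for lhs in hits:
--         if last < lhs:
--             ners.append(ner)
--             fences.append(lhs)
--             last = lhs
--         ners.append(o_idx)
--         if lhs + 1 < end:
--             fences.append(lhs + 1)
--             last = lhs + 1
--     if not hits or hits[-1] < end - 1:
--         ners.append(ner)
--     fences.append(end)
--     return ners, fences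
--
-- def substitute_o(old_ner, old_fence, n_indices, o_idx):
--     ends = old_fence[1:][:len(old_ner)]
--     nseg = len(ends)
--     # pass 1: bucket the indices by segment, iterating over the indices with a pointer
--     buckets = [[] for _ in range(nseg)]
--     s = 0
--     for x in n_indices:
--         while s < nseg and ends[s] <= x:
--             s += 1
--         if s < nseg:
--             buckets[s].append(x)
--     # pass 2: each segment rendered independently; its entry fence is the previous end
--     lasts = [0] + ends[:-1]
--     segs = [_render(ner, end, last, hits, o_idx)
--             for ner, end, last, hits in zip(old_ner, ends, lasts, buckets)]
--     new_ner = [n for ns, _ in segs for n in ns]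
--     new_fence = [0] + [f for _, fs in segs for f in fs]
--     return new_ner, new_fence
-- ===== Notes on version B (the rewrite author's own statement) =====
-- stated objective: alternative
-- what changed: Replaces A's single merged loop (segments outside, a global index pointer and a `substituted` flag threaded through shared mutable accumulators) with two staged passes: pass 1 iterates over the indices with a pointer and buckets them per segment; pass 2 renders every segment independently (its entry fence is just the previous end) and concatenates the pieces.
import Mathlib
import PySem

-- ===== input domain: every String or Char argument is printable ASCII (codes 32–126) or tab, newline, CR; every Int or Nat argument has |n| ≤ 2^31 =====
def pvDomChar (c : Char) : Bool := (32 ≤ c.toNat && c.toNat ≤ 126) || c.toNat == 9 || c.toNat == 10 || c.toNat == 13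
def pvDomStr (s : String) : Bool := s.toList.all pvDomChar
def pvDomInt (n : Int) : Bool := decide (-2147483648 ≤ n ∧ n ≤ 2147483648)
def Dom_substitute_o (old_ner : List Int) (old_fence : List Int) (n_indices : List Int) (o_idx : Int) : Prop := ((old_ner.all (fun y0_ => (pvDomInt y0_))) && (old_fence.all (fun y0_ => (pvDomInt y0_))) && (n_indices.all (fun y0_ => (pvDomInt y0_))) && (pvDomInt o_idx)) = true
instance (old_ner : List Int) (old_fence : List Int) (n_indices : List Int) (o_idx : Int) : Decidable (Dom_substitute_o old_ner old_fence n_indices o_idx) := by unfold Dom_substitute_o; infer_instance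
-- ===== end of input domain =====

-- B replaces A's single stateful merged loop by two staged passes: bucket the indices by
-- segment (a loop over the indices), then render every segment independently; same cost.

-- ===== PORT A =====
-- A's inner `while` loop: state = (substution, new_ner, new_fence, substituted)
def aWhile (n_indices : List Int) (o_idx ner end_ : Int) (sub : Nat)
    (nner nfence : List Int) (substd : Option Int) : Nat × List Int × List Int × Option Int :=
  match h : n_indices[sub]? with
  | none => (sub, nner, nfence, substd)
  | some lhs =>
    if lhs < end_ then
      let p := if PySem.List.pyGetD nfence (-1) 0 < lhs
               then (nner ++ [ner], nfence ++ [lhs]) else (nner, nfence)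
      aWhile n_indices o_idx ner end_ (sub + 1) (p.1 ++ [o_idx])
        (if lhs + 1 < end_ then p.2 ++ [lhs + 1] else p.2) (some lhs)
    else (sub, nner, nfence, substd)
  termination_by n_indices.length - sub
  decreasing_by
    obtain ⟨hl, -⟩ := List.getElem?_eq_some_iff.mp h
    omega

def substitute_o (old_ner : List Int) (old_fence : List Int) (n_indices : List Int) (o_idx : Int) : List Int × List Int :=
  let segs := old_ner.zip (old_fence.zip (old_fence.drop 1))
  let r := segs.foldl (fun st seg =>
    let w := aWhile n_indices o_idx seg.1 seg.2.2 st.1 st.2.1 st.2.2 none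
    let nner := match w.2.2.2 with
      | none => w.2.1 ++ [seg.1]
      | some s => if s < seg.2.2 - 1 then w.2.1 ++ [seg.1] else w.2.1
    (w.1, nner, w.2.2.1 ++ [seg.2.2])) (0, ([] : List Int), ([0] : List Int))
  (r.2.1, r.2.2)

-- ===== PORT B =====
-- Source B pass-1 pointer advance: `while s < nseg and ends[s] <= x: s += 1` (nseg = ends.length)
def bAdv (ends : List Int) (x : Int) (s : Nat) : Nat :=
  match h : ends[s]? with
  | none => s
  | some e => if e ≤ x then bAdv ends x (s + 1) else s
  termination_by ends.length - s
  decreasing_by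
    obtain ⟨hl, -⟩ := List.getElem?_eq_some_iff.mp h
    omega

-- Source B `_render`'s for-loop over hits, threading `last`
def bLoop (o_idx ner end_ : Int) (last : Int) : List Int → List Int × List Int
  | [] => ([], [])
  | lhs :: rest =>
    let q := if last < lhs then (([ner, o_idx], [lhs]), lhs) else (([o_idx], ([] : List Int)), last)
    let q2 := if lhs + 1 < end_ then (q.1.2 ++ [lhs + 1], lhs + 1) else (q.1.2, q.2)
    let t := bLoop o_idx ner end_ q2.2 rest
    (q.1.1 ++ t.1, q2.1 ++ t.2)

-- Source B `_render`: one segment, rendered from its own hit list only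
def bRender (ner end_ last : Int) (hits : List Int) (o_idx : Int) : List Int × List Int :=
  let c := bLoop o_idx ner end_ last hits
  ((if hits = [] ∨ PySem.List.pyGetD hits (-1) 0 < end_ - 1 then c.1 ++ [ner] else c.1),
   c.2 ++ [end_])

def substitute_o_alt (old_ner : List Int) (old_fence : List Int) (n_indices : List Int) (o_idx : Int) : List Int × List Int :=
  -- ends = old_fence[1:][:len(old_ner)]  (non-negative slices: drop/take are exact)
  let ends := (old_fence.drop 1).take old_ner.length
  let nseg := ends.length
  -- pass 1: bucket the indices by segment (loop over n_indices; buckets[s].append(x))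
  let buckets := (n_indices.foldl (fun st x =>
      let s := bAdv ends x st.2
      (if s < nseg then st.1.modify s (· ++ [x]) else st.1, s))
    (List.replicate nseg ([] : List Int), 0)).1
  -- pass 2: lasts = [0] + ends[:-1]; render each segment independently, then flatten
  let lasts := 0 :: ends.dropLast
  let segs := (old_ner.zip (ends.zip (lasts.zip buckets))).map
      (fun t => bRender t.1 t.2.1 t.2.2.1 t.2.2.2 o_idx)
  ((segs.map Prod.fst).flatten, 0 :: (segs.map Prod.snd).flatten)

-- ===== PRECONDITION & SPEC =====
def Spec_substitute_o (old_ner : List Int) (old_fence : List Int) (n_indices : List Int) (o_idx : Int) (out : List Int × List Int) : Prop := out = substitute_o_alt old_ner old_fence n_indices o_idx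
instance (old_ner : List Int) (old_fence : List Int) (n_indices : List Int) (o_idx : Int) (out : List Int × List Int) : Decidable (Spec_substitute_o old_ner old_fence n_indices o_idx out) := by unfold Spec_substitute_o; infer_instance

-- ===== CLAIM (what is proved, stated in full; the proofs are below) =====
def Claim_equal_substitute_o : Prop := ∀ (old_ner : List Int) (old_fence : List Int) (n_indices : List Int) (o_idx : Int), Dom_substitute_o old_ner old_fence n_indices o_idx → Spec_substitute_o old_ner old_fence n_indices o_idx (substitute_o old_ner old_fence n_indices o_idx)

-- ===== LEMMAS AND PROOFS =====

-- proof-side bridge: the per-segment takewhile cascade both programs amount to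
def splitB : List Int → List Int → List (List Int)
  | [], _ => []
  | e :: es, xs => xs.takeWhile (fun x => x < e) :: splitB es (xs.dropWhile (fun x => x < e))

def gGo (o_idx : Int) : List (Int × Int) → List Int → Int → List Int × List Int
  | [], _, _ => ([], [])
  | (ner, end_) :: rest, idxs, last =>
    let hits := idxs.takeWhile (fun x => x < end_)
    let remaining := idxs.dropWhile (fun x => x < end_)
    let c := bLoop o_idx ner end_ last hits
    let ners := if hits = [] ∨ PySem.List.pyGetD hits (-1) 0 < end_ - 1 then c.1 ++ [ner] else c.1
    let t := gGo o_idx rest remaining end_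
    (ners ++ t.1, c.2 ++ [end_] ++ t.2)

theorem pyGetD_snoc (xs : List Int) (a : Int) :
    PySem.List.pyGetD (xs ++ [a]) (-1) 0 = a := by
  exact PySem.List.pyGetD_neg_one_append_singleton xs a 0

theorem drop_length_takeWhile (p : Int → Bool) (l : List Int) :
    l.drop (l.takeWhile p).length = l.dropWhile p := by
  induction l with
  | nil => rfl
  | cons a t ih =>
    by_cases h : p a
    · simp [h, ih]
    · simp [h]

-- the inner while of A, expressed by the per-segment loop on the takewhile prefix
theorem aWhile_eq_fuel (n_indices : List Int) (o_idx ner end_ : Int) :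
    ∀ (fuel sub : Nat) (nner nfence : List Int) (substd : Option Int),
    n_indices.length ≤ sub + fuel → nfence ≠ [] →
    aWhile n_indices o_idx ner end_ sub nner nfence substd =
      (sub + ((n_indices.drop sub).takeWhile (fun x => x < end_)).length,
       nner ++ (bLoop o_idx ner end_ (PySem.List.pyGetD nfence (-1) 0)
                 ((n_indices.drop sub).takeWhile (fun x => x < end_))).1,
       nfence ++ (bLoop o_idx ner end_ (PySem.List.pyGetD nfence (-1) 0)
                 ((n_indices.drop sub).takeWhile (fun x => x < end_))).2,
       ((n_indices.drop sub).takeWhile (fun x => x < end_)).getLast?.or substd) := by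
  intro fuel
  induction fuel with
  | zero =>
    intro sub nner nfence substd hf hne
    rw [aWhile]
    match h : n_indices[sub]? with
    | none => simp [List.drop_eq_nil_of_le (by omega : n_indices.length ≤ sub), bLoop]
    | some lhs =>
      exfalso
      obtain ⟨hl, -⟩ := List.getElem?_eq_some_iff.mp h
      omega
  | succ f ihf =>
    intro sub nner nfence substd hf hne
    rw [aWhile]
    match h : n_indices[sub]? with
    | none =>
      have hlen : n_indices.length ≤ sub := List.getElem?_eq_none_iff.mp h
      simp [List.drop_eq_nil_of_le hlen, bLoop]
    | some lhs =>
      obtain ⟨hl, hv⟩ := List.getElem?_eq_some_iff.mp h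
      have hdrop : n_indices.drop sub = lhs :: n_indices.drop (sub + 1) := by
        rw [List.drop_eq_getElem_cons hl, hv]
      by_cases hcond : lhs < end_
      · simp only [hcond, if_true]
        rw [hdrop, List.takeWhile_cons]
        simp only [hcond, decide_true, if_true]
        rw [bLoop]
        set tl := (n_indices.drop (sub + 1)).takeWhile (fun x => x < end_) with htl
        by_cases h1 : PySem.List.pyGetD nfence (-1) 0 < lhs
        · simp only [h1, if_true]
          by_cases h2 : lhs + 1 < end_
          · simp only [h2, if_true]
            rw [ihf (sub + 1) (nner ++ [ner] ++ [o_idx]) (nfence ++ [lhs] ++ [lhs + 1])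
              (some lhs) (by omega) (by simp)]
            rw [pyGetD_snoc (nfence ++ [lhs]) (lhs + 1)]
            simp only [← htl, List.length_cons, Prod.mk.injEq]
            refine ⟨by omega, by simp, by simp, ?_⟩
            cases htl' : tl.getLast? <;> simp [List.getLast?_cons, htl', Option.or]
          · simp only [h2, if_false]
            rw [ihf (sub + 1) (nner ++ [ner] ++ [o_idx]) (nfence ++ [lhs])
              (some lhs) (by omega) (by simp)]
            rw [pyGetD_snoc nfence lhs]
            simp only [← htl, List.length_cons, Prod.mk.injEq]
            refine ⟨by omega, by simp, by simp, ?_⟩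
            cases htl' : tl.getLast? <;> simp [List.getLast?_cons, htl', Option.or]
        · simp only [h1, if_false]
          by_cases h2 : lhs + 1 < end_
          · simp only [h2, if_true]
            rw [ihf (sub + 1) (nner ++ [o_idx]) (nfence ++ [lhs + 1])
              (some lhs) (by omega) (by simp)]
            rw [pyGetD_snoc nfence (lhs + 1)]
            simp only [← htl, List.length_cons, Prod.mk.injEq]
            refine ⟨by omega, by simp, by simp, ?_⟩
            cases htl' : tl.getLast? <;> simp [List.getLast?_cons, htl', Option.or]
          · simp only [h2, if_false]
            rw [ihf (sub + 1) (nner ++ [o_idx]) nfence (some lhs) (by omega) hne]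
            simp only [← htl, List.length_cons, Prod.mk.injEq]
            refine ⟨by omega, by simp, by simp, ?_⟩
            cases htl' : tl.getLast? <;> simp [List.getLast?_cons, htl', Option.or]
      · simp only [hcond, if_false]
        rw [hdrop, List.takeWhile_cons]
        simp [hcond, bLoop]

theorem aWhile_eq (n_indices : List Int) (o_idx ner end_ : Int)
    (sub : Nat) (nner nfence : List Int) (substd : Option Int) (hne : nfence ≠ []) :
    aWhile n_indices o_idx ner end_ sub nner nfence substd =
      (sub + ((n_indices.drop sub).takeWhile (fun x => x < end_)).length,
       nner ++ (bLoop o_idx ner end_ (PySem.List.pyGetD nfence (-1) 0)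
                 ((n_indices.drop sub).takeWhile (fun x => x < end_))).1,
       nfence ++ (bLoop o_idx ner end_ (PySem.List.pyGetD nfence (-1) 0)
                 ((n_indices.drop sub).takeWhile (fun x => x < end_))).2,
       ((n_indices.drop sub).takeWhile (fun x => x < end_)).getLast?.or substd) :=
  aWhile_eq_fuel n_indices o_idx ner end_ n_indices.length sub nner nfence substd (by omega) hne

-- the outer fold of A, expressed by the bridge gGo
theorem foldl_eq_gGo (n_indices : List Int) (o_idx : Int) :
    ∀ (segs : List (Int × Int × Int)) (sub : Nat) (nner nfence : List Int), nfence ≠ [] →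
    segs.foldl (fun st seg =>
      let w := aWhile n_indices o_idx seg.1 seg.2.2 st.1 st.2.1 st.2.2 none
      let nner := match w.2.2.2 with
        | none => w.2.1 ++ [seg.1]
        | some s => if s < seg.2.2 - 1 then w.2.1 ++ [seg.1] else w.2.1
      (w.1, nner, w.2.2.1 ++ [seg.2.2])) (sub, nner, nfence) =
    ((segs.foldl (fun st seg =>
      let w := aWhile n_indices o_idx seg.1 seg.2.2 st.1 st.2.1 st.2.2 none
      let nner := match w.2.2.2 with
        | none => w.2.1 ++ [seg.1]
        | some s => if s < seg.2.2 - 1 then w.2.1 ++ [seg.1] else w.2.1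
      (w.1, nner, w.2.2.1 ++ [seg.2.2])) (sub, nner, nfence)).1,
     nner ++ (gGo o_idx (segs.map (fun s => (s.1, s.2.2))) (n_indices.drop sub)
                (PySem.List.pyGetD nfence (-1) 0)).1,
     nfence ++ (gGo o_idx (segs.map (fun s => (s.1, s.2.2))) (n_indices.drop sub)
                (PySem.List.pyGetD nfence (-1) 0)).2) := by
  intro segs
  induction segs with
  | nil => intro sub nner nfence hne; simp [gGo]
  | cons seg rest ih =>
    intro sub nner nfence hne
    obtain ⟨ner, st, en⟩ := seg
    simp only [List.foldl_cons, List.map_cons]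
    rw [aWhile_eq n_indices o_idx ner en sub nner nfence none hne]
    set hits := (n_indices.drop sub).takeWhile (fun x => x < en) with hhits
    set c := bLoop o_idx ner en (PySem.List.pyGetD nfence (-1) 0) hits with hc
    simp only
    have hcondEq : (match hits.getLast?.or none with
        | none => nner ++ c.1 ++ [ner]
        | some s => if s < en - 1 then nner ++ c.1 ++ [ner] else nner ++ c.1) =
        nner ++ (if hits = [] ∨ PySem.List.pyGetD hits (-1) 0 < en - 1
                 then c.1 ++ [ner] else c.1) := by
      match hh : hits with
      | [] => simp
      | a :: t =>
        have hne' : (a :: t : List Int) ≠ [] := by simp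
        have hsome : (a :: t).getLast? = some ((a :: t).getLast hne') :=
          List.getLast?_eq_some_getLast hne'
        rw [hsome]
        have hpg : PySem.List.pyGetD (a :: t) (-1) 0 = (a :: t).getLast hne' :=
          PySem.List.pyGetD_neg_one (a :: t) 0 hne'
        simp only [Option.or, hpg]
        by_cases hlt : (a :: t).getLast hne' < en - 1 <;> simp [hlt]
    rw [hcondEq]
    have hdropNext : n_indices.drop (sub + hits.length) =
        (n_indices.drop sub).dropWhile (fun x => x < en) := by
      rw [← drop_length_takeWhile (fun x => x < en) (n_indices.drop sub), ← hhits,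
        ← List.drop_drop]
    rw [ih (sub + hits.length)
      (nner ++ if hits = [] ∨ PySem.List.pyGetD hits (-1) 0 < en - 1 then c.1 ++ [ner] else c.1)
      (nfence ++ c.2 ++ [en]) (by simp)]
    rw [hdropNext]
    have hg : PySem.List.pyGetD (nfence ++ c.2 ++ [en]) (-1) 0 = en := by
      rw [List.append_assoc, ← List.append_assoc]; exact pyGetD_snoc _ _
    rw [hg]
    conv_rhs => rw [gGo]
    simp only [← hhits, ← hc, Prod.mk.injEq]
    refine ⟨by simp, by simp, by simp⟩

theorem zip3_proj (a : List Int) :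
    ∀ (b c : List Int), c.length ≤ b.length →
    (a.zip (b.zip c)).map (fun s => (s.1, s.2.2)) = a.zip c := by
  induction a with
  | nil => intro b c _; simp
  | cons x xs ih =>
    intro b c hlen
    match c with
    | [] => simp
    | y :: ys =>
      match b with
      | [] => simp at hlen
      | z :: zs =>
        simp only [List.zip_cons_cons, List.map_cons]
        rw [ih zs ys (by simpa using hlen)]

-- modify at the exact boundary of an append
theorem modify_boundary (l : List (List Int)) (l2 : List Int) (r : List (List Int))
    (g : List Int → List Int) :
    (l ++ (l2 :: r)).modify l.length g = l ++ (g l2 :: r) := by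
  induction l with
  | nil => simp [List.modify]
  | cons a t ih => simpa [List.modify] using ih

-- closed form of Source B's pointer advance
theorem bAdv_eq_fuel (ends : List Int) (x : Int) :
    ∀ (fuel s : Nat), ends.length ≤ s + fuel →
    bAdv ends x s = s + ((ends.drop s).takeWhile (fun e => e ≤ x)).length := by
  intro fuel
  induction fuel with
  | zero =>
    intro s hf
    rw [bAdv]
    match h : ends[s]? with
    | none => simp [List.drop_eq_nil_of_le (by omega : ends.length ≤ s)]
    | some e =>
      exfalso
      obtain ⟨hl, -⟩ := List.getElem?_eq_some_iff.mp h
      omega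
  | succ f ihf =>
    intro s hf
    rw [bAdv]
    match h : ends[s]? with
    | none =>
      have hlen : ends.length ≤ s := List.getElem?_eq_none_iff.mp h
      simp [List.drop_eq_nil_of_le hlen]
    | some e =>
      obtain ⟨hl, hv⟩ := List.getElem?_eq_some_iff.mp h
      have hdrop : ends.drop s = e :: ends.drop (s + 1) := by
        rw [List.drop_eq_getElem_cons hl, hv]
      rw [hdrop, List.takeWhile_cons]
      by_cases hc : e ≤ x
      · simp only [hc, if_true, decide_true]
        rw [ihf (s + 1) (by omega)]
        simp; omega
      · simp [hc]

theorem bAdv_eq (ends : List Int) (x : Int) (s : Nat) :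
    bAdv ends x s = s + ((ends.drop s).takeWhile (fun e => e ≤ x)).length :=
  bAdv_eq_fuel ends x ends.length s (by omega)

-- helpers for the pass-1 invariant: initial padding and in-progress split
def padC (cur : List Int) : List Int → List (List Int)
  | [] => []
  | _ :: t => cur :: List.replicate t.length ([] : List Int)

def splitC (cur : List Int) : List Int → List Int → List (List Int)
  | [], _ => []
  | e :: t, xs => (cur ++ xs.takeWhile (fun x => x < e)) ::
      splitB t (xs.dropWhile (fun x => x < e))

theorem padC_nil (es : List Int) : padC [] es = List.replicate es.length ([] : List Int) := by
  cases es <;> simp [padC, List.replicate_succ]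

theorem splitC_nil (es xs : List Int) : splitC [] es xs = splitB es xs := by
  cases es <;> simp [splitC, splitB]

theorem splitB_nil : ∀ t : List Int, splitB t [] = List.replicate t.length ([] : List Int) := by
  intro t
  induction t with
  | nil => rfl
  | cons a t ih => simp [splitB, ih, List.replicate_succ]

-- pass 1 of B computes exactly the takewhile cascade splitB
theorem pass1_eq_splitB (ends : List Int) :
    ∀ (es2 xs : List Int) (frozen : List (List Int)) (cur : List Int),
    ends.drop frozen.length = es2 →
    (xs.foldl (fun (st : List (List Int) × Nat) x =>
        let s := bAdv ends x st.2
        (if s < ends.length then st.1.modify s (· ++ [x]) else st.1, s))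
      (frozen ++ padC cur es2, frozen.length)).1
    = frozen ++ splitC cur es2 xs := by
  intro es2
  induction es2 with
  | nil =>
    intro xs frozen cur hdrop
    have hlen : ends.length ≤ frozen.length := by
      by_contra hcon
      have hne : ends.drop frozen.length ≠ [] := by
        simp only [ne_eq, List.drop_eq_nil_iff]
        omega
      exact hne hdrop
    suffices h : ∀ (xs : List Int) (b : List (List Int)),
        (xs.foldl (fun (st : List (List Int) × Nat) x =>
          let s := bAdv ends x st.2
          (if s < ends.length then st.1.modify s (· ++ [x]) else st.1, s))
          (b, frozen.length)) = (b, frozen.length) by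
      simpa [padC, splitC] using congrArg Prod.fst (h xs (frozen ++ padC cur []))
    intro xs
    induction xs with
    | nil => intro b; rfl
    | cons x xs ihx =>
      intro b
      simp only [List.foldl_cons]
      have hb : bAdv ends x frozen.length = frozen.length := by
        rw [bAdv_eq, List.drop_eq_nil_of_le hlen]
        simp
      simp only [hb]
      rw [if_neg (by omega)]
      exact ihx b
  | cons e t iht =>
    intro xs
    induction xs with
    | nil =>
      intro frozen cur hdrop
      simp [padC, splitC, splitB_nil]
    | cons x xs ihx =>
      intro frozen cur hdrop
      have hdrop1 : ends.drop (frozen.length + 1) = t := by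
        have h1 := congrArg (List.drop 1) hdrop
        simpa [List.drop_drop, Nat.add_comm] using h1
      have hfl : frozen.length < ends.length := by
        by_contra hcon
        rw [List.drop_eq_nil_of_le (by omega)] at hdrop
        exact (by simp : (e :: t : List Int) ≠ []) hdrop.symm
      have hadv : bAdv ends x frozen.length =
          frozen.length + ((e :: t).takeWhile (fun y => y ≤ x)).length := by
        rw [bAdv_eq, hdrop]
      by_cases hc : e ≤ x
      · -- x closes the current bucket: shift the frozen boundary and retry x via the outer IH
        have hadv1 : bAdv ends x (frozen.length + 1) =
            frozen.length + 1 + (t.takeWhile (fun y => y ≤ x)).length := by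
          rw [bAdv_eq, hdrop1]
        have hs : bAdv ends x frozen.length = bAdv ends x (frozen.length + 1) := by
          rw [hadv, hadv1, List.takeWhile_cons, if_pos (by simpa using hc)]
          simp [Nat.add_assoc, Nat.add_comm]
        have hbuck : frozen ++ padC cur (e :: t) = (frozen ++ [cur]) ++ padC [] t := by
          cases t <;> simp [padC, List.replicate_succ]
        have hres := iht (x :: xs) (frozen ++ [cur]) [] (by simpa using hdrop1)
        simp only [List.foldl_cons, List.length_append, List.length_cons,
          List.length_nil, Nat.zero_add] at hres
        simp only [List.foldl_cons]
        rw [hs, hbuck, hres]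
        have htw : (x :: xs).takeWhile (fun y => y < e) = ([] : List Int) := by
          simp [not_lt.mpr hc]
        have hdw : (x :: xs).dropWhile (fun y => y < e) = x :: xs := by
          simp [not_lt.mpr hc]
        simp only [splitC, htw, hdw]
        cases t <;> simp [splitB]
      · -- x < e: x lands in the current bucket; recurse on xs with cur ++ [x]
        have hs0 : bAdv ends x frozen.length = frozen.length := by
          rw [hadv, List.takeWhile_cons, if_neg (by simpa using hc)]
          simp
        have hres := ihx frozen (cur ++ [x]) hdrop
        simp only [List.foldl_cons, hs0, padC, if_pos hfl]
        rw [modify_boundary frozen cur (List.replicate t.length []) (· ++ [x])]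
        simp only [padC] at hres
        rw [hres]
        have htw : (x :: xs).takeWhile (fun y => y < e) =
            x :: xs.takeWhile (fun y => y < e) := by
          simp [lt_of_not_ge hc]
        have hdw : (x :: xs).dropWhile (fun y => y < e) =
            xs.dropWhile (fun y => y < e) := by
          simp [lt_of_not_ge hc]
        simp [splitC, htw, hdw]

-- zip ignores a take to the left length
theorem zip_take_self (a : List Int) :
    ∀ (b : List Int), a.zip (b.take a.length) = a.zip b := by
  induction a with
  | nil => intro b; simp
  | cons x xs ih =>
    intro b
    cases b with
    | nil => simp
    | cons y ys => simp [List.take_succ_cons, ih]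

-- pass 2 of B (independent renders, flattened) equals the bridge gGo
theorem mapflat_eq_gGo (o_idx : Int) :
    ∀ (ends ners idxs : List Int) (last : Int),
    (((((ners.zip (ends.zip ((last :: ends.dropLast).zip (splitB ends idxs)))).map
        (fun t => bRender t.1 t.2.1 t.2.2.1 t.2.2.2 o_idx)).map Prod.fst).flatten : List Int),
     ((((ners.zip (ends.zip ((last :: ends.dropLast).zip (splitB ends idxs)))).map
        (fun t => bRender t.1 t.2.1 t.2.2.1 t.2.2.2 o_idx)).map Prod.snd).flatten : List Int))
    = gGo o_idx (ners.zip ends) idxs last := by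
  intro ends
  induction ends with
  | nil => intro ners idxs last; simp [splitB, gGo]
  | cons e es ih =>
    intro ners idxs last
    match ners with
    | [] => simp [gGo]
    | ner :: ners' =>
      simp only [splitB, List.zip_cons_cons, List.map_cons, List.flatten_cons]
      rw [gGo]
      cases es with
      | nil =>
        simp [splitB, gGo, bRender]
      | cons e' es' =>
        have hdl : ((e :: e' :: es').dropLast : List Int) = e :: (e' :: es').dropLast := by
          simp
        rw [hdl]
        have hih := ih ners' (idxs.dropWhile (fun x => x < e)) e
        rw [← hih]
        simp [bRender]

-- ===== VERDICT (by name: the statement is the Claim_ definition above) =====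
theorem substitute_o_spec : Claim_equal_substitute_o := by
  intro old_ner old_fence n_indices o_idx _
  show _ = _
  simp only [substitute_o, substitute_o_alt]
  rw [foldl_eq_gGo n_indices o_idx _ 0 [] [0] (by simp)]
  rw [zip3_proj old_ner old_fence (old_fence.drop 1) (by simp)]
  -- B side: pass 1 is splitB
  have h1 := pass1_eq_splitB ((old_fence.drop 1).take old_ner.length)
    ((old_fence.drop 1).take old_ner.length) n_indices [] [] (by simp)
  simp only [padC_nil, splitC_nil, List.nil_append, List.length_nil] at h1
  simp only [h1]
  -- pass 2 is gGo on the truncated ends, which zip ignores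
  have h2 := mapflat_eq_gGo o_idx ((old_fence.drop 1).take old_ner.length) old_ner n_indices 0
  rw [Prod.ext_iff] at h2
  simp only at h2
  rw [zip_take_self old_ner (old_fence.drop 1)] at h2
  simp only [List.drop_zero]
  rw [h2.1, h2.2]
  simp [PySem.List.pyGetD, PySem.List.pyGet?, PySem.List.pyIdx?]
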